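-- pv_equiv track=rewrite | github.com/manwar/perlweeklychallenge-club | challenge-336/sgreen/python/ch-1.py | equal_group
-- ===== SOURCE A (Python) =====
-- from collections import Counter
--
-- def equal_group(ints: list) -> bool:
--     # Calculate the frequency of each integer in the list
--     freq = Counter(ints).values()
--
--     # If any integer appears only once, it is always false.
--     if min(freq) == 1:
--         return False
--
--     # Check if all frequencies are evenly divisible by an integer.
--     for i in range(2, max(freq) + 1):
--         if all(f % i == 0 for f in freq):
--             return True
--
--     return False
-- ===== SOURCE B (Python) =====
-- from collections import Counter
--
--
-- def _gcd(a, b):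
--     while b:
--         a, b = b, a % b
--     return a
--
--
-- def equal_group(ints: list) -> bool:
--     # The group sizes that work are exactly the common divisors >= 2 of all
--     # frequencies, so it suffices to look at the gcd of the frequencies.
--     g = 0
--     for f in Counter(ints).values():
--         g = _gcd(g, f)
--     return g >= 2
-- ===== Notes on version B (the rewrite author's own statement) =====
-- stated objective: simpler
-- what changed: Instead of trying every candidate group size from 2 up to the largest frequency with an inner scan of all frequencies, B folds Euclid's gcd once over the frequency counts and returns gcd >= 2.
import Mathlib
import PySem

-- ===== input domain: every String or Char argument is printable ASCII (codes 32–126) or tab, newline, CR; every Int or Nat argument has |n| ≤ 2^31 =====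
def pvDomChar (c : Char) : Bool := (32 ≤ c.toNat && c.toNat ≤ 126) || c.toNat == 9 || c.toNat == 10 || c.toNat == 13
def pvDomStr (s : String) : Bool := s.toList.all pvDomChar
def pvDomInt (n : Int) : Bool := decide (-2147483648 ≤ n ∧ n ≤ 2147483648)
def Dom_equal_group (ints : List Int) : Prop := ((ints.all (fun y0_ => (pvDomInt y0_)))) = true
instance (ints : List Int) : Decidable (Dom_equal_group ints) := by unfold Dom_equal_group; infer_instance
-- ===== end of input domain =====

-- B replaces A's scan of every candidate group size 2..max(freq) (with an inner scan of all frequencies) by a single gcd fold over the frequencies (simpler).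

-- ===== PORT A =====
-- the 'for i in range(...): if all(...): return True' loop of A
def pvLoopA (freq : List Int) : List Int → Bool
  | [] => false
  | i :: rest => if freq.all (fun f => PySem.Int.mod f i == 0) then true else pvLoopA freq rest

def equal_group (ints : List Int) : Bool :=
  let freq := (PySem.Dict.counter ints).values
  match PySem.List.min? freq (fun x => x), PySem.List.max? freq (fun x => x) with
  | some mn, some mx =>
      if mn == 1 then false
      else pvLoopA freq (PySem.List.pyRange 2 (mx + 1) 1)
  | _, _ => false      -- unreachable under Pre_: Python's min([]) raises ValueError

-- ===== PORT B =====
-- termination lemma for the Euclid loop of Source B's _gcd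
theorem pvFmodNatAbsLt (a b : Int) (h : b ≠ 0) : (PySem.Int.mod a b).natAbs < b.natAbs := by
  rcases lt_or_gt_of_ne h with hb | hb
  · have he : a % b = a % (-b) := (Int.emod_neg a b).symm
    have h0 : 0 ≤ a % b := Int.emod_nonneg a h
    have h1 : a % b < -b := by rw [he]; exact Int.emod_lt_of_pos a (by omega)
    show (Int.fmod a b).natAbs < b.natAbs
    rw [Int.fmod_eq_emod]
    split_ifs with hif
    · rcases hif with h2 | h2
      · omega
      · have : a % b = 0 := Int.emod_eq_zero_of_dvd h2
        omega
    · omega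
  · have h0 := Int.fmod_nonneg_of_pos a hb
    have h1 := Int.fmod_lt_of_pos a hb
    show (Int.fmod a b).natAbs < b.natAbs
    omega

-- Source B's _gcd: while b: a, b = b, a % b
def pvGcd (a b : Int) : Int :=
  if h : b = 0 then a else pvGcd b (PySem.Int.mod a b)
termination_by b.natAbs
decreasing_by exact pvFmodNatAbsLt a b h

def equal_group_alt (ints : List Int) : Bool :=
  decide (2 ≤ (PySem.Dict.counter ints).values.foldl pvGcd 0)

-- ===== PRECONDITION & SPEC =====
-- Pre_ excludes only the empty list, on which Python's min([]) raises ValueError.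
def Pre_equal_group (ints : List Int) : Prop := ints ≠ []
instance (ints : List Int) : Decidable (Pre_equal_group ints) := by unfold Pre_equal_group; infer_instance
def pvWitness_equal_group : List Int := [1, 1]

def Spec_equal_group (ints : List Int) (out : Bool) : Prop := out = equal_group_alt ints
instance (ints : List Int) (out : Bool) : Decidable (Spec_equal_group ints out) := by unfold Spec_equal_group; infer_instance

-- ===== CLAIM (what is proved, stated in full; the proofs are below) =====
def Claim_equal_equal_group : Prop := ∀ (ints : List Int), Dom_equal_group ints → Pre_equal_group ints → Spec_equal_group ints (equal_group ints)

-- ===== LEMMAS AND PROOFS =====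

-- pvGcd is a greatest common divisor on nonnegative arguments
theorem pvGcd_props (a b : Int) (ha : 0 ≤ a) (hb : 0 ≤ b) :
    0 ≤ pvGcd a b ∧ pvGcd a b ∣ a ∧ pvGcd a b ∣ b ∧
      ∀ i : Int, i ∣ a → i ∣ b → i ∣ pvGcd a b := by
  induction a, b using pvGcd.induct with
  | case1 a =>
      rw [pvGcd]
      simp [ha]
  | case2 a b h ih =>
      have hbpos : 0 < b := lt_of_le_of_ne hb (Ne.symm h)
      have hmod : PySem.Int.mod a b = a % b := PySem.Int.mod_eq_emod_of_pos hbpos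
      have hm0 : 0 ≤ PySem.Int.mod a b := by rw [hmod]; exact Int.emod_nonneg a h
      obtain ⟨g0, gb, gm, gmax⟩ := ih hb hm0
      rw [pvGcd, dif_neg h]
      have hsum : b * (a / b) + a % b = a := Int.ediv_add_emod a b
      refine ⟨g0, ?_, gb, ?_⟩
      · -- divides a:  a = b * (a / b) + a % b
        have h2 : pvGcd b (PySem.Int.mod a b) ∣ b * (a / b) + a % b :=
          dvd_add (Dvd.dvd.mul_right gb _) (by rw [← hmod]; exact gm)
        rwa [hsum] at h2
      · intro i hia hib
        refine gmax i hib ?_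
        rw [hmod]
        have h3 : a % b = a - b * (a / b) := by omega
        rw [h3]
        exact dvd_sub hia (Dvd.dvd.mul_right hib _)

theorem pvFold_props (l : List Int) (a : Int) (ha : 0 ≤ a) (hl : ∀ f ∈ l, 0 ≤ f) :
    0 ≤ l.foldl pvGcd a ∧ (l.foldl pvGcd a ∣ a) ∧ (∀ f ∈ l, l.foldl pvGcd a ∣ f) ∧
      ∀ i : Int, i ∣ a → (∀ f ∈ l, i ∣ f) → i ∣ l.foldl pvGcd a := by
  induction l generalizing a with
  | nil => exact ⟨ha, dvd_refl a, by simp, fun i hia _ => hia⟩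
  | cons f t ih =>
      have hf : 0 ≤ f := hl f (by simp)
      obtain ⟨g0, ga, gf, gmax⟩ := pvGcd_props a f ha hf
      obtain ⟨h0, hd, hmem, hmax⟩ := ih (pvGcd a f) g0 (fun x hx => hl x (by simp [hx]))
      refine ⟨h0, dvd_trans hd ga, ?_, ?_⟩
      · intro x hx
        rcases List.mem_cons.mp hx with rfl | hx
        · exact dvd_trans hd gf
        · exact hmem x hx
      · intro i hia hfor
        exact hmax i (gmax i hia (hfor f (by simp))) (fun x hx => hfor x (by simp [hx]))

theorem pvLoopA_true_iff (freq : List Int) (r : List Int) :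
    pvLoopA freq r = true ↔ ∃ i ∈ r, (freq.all (fun f => PySem.Int.mod f i == 0)) = true := by
  induction r with
  | nil => simp [pvLoopA]
  | cons i t ih =>
      rw [pvLoopA]
      split_ifs with h
      · simp only [true_iff]
        exact ⟨i, List.mem_cons_self, h⟩
      · rw [ih]
        constructor
        · rintro ⟨j, hj, hja⟩; exact ⟨j, List.mem_cons_of_mem i hj, hja⟩
        · rintro ⟨j, hj, hja⟩
          rcases List.mem_cons.mp hj with rfl | hj
          · exact absurd hja h
          · exact ⟨j, hj, hja⟩

theorem pvFreq_eq (ints : List Int) :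
    (PySem.Dict.counter ints).values = (PySem.Set.ofList ints).map (fun k => ((ints.count k : Nat) : Int)) := by
  simp only [PySem.Dict.values, PySem.Dict.items_counter, List.map_map]
  rfl

theorem pvFreq_pos (ints : List Int) (f : Int) (hf : f ∈ (PySem.Dict.counter ints).values) : 1 ≤ f := by
  rw [pvFreq_eq] at hf
  obtain ⟨k, hk, rfl⟩ := List.mem_map.mp hf
  have : k ∈ ints := (PySem.Set.mem_ofList ints k).mp hk
  have : 0 < ints.count k := List.count_pos_iff.mpr this
  exact_mod_cast this

theorem pvFreq_ne_nil (ints : List Int) (h : ints ≠ []) : (PySem.Dict.counter ints).values ≠ [] := by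
  rw [pvFreq_eq]
  rcases List.exists_mem_of_ne_nil ints h with ⟨x, hx⟩
  have : x ∈ PySem.Set.ofList ints := (PySem.Set.mem_ofList ints x).mpr hx
  intro hc
  simp [List.map_eq_nil_iff] at hc
  rw [hc] at this
  simp at this

-- ===== VERDICT (by name: the statement is the Claim_ definition above) =====
theorem equal_group_spec : Claim_equal_equal_group := by
  intro ints _ hpre
  unfold Spec_equal_group equal_group equal_group_alt
  set freq := (PySem.Dict.counter ints).values with hfreq
  have hpos : ∀ f ∈ freq, 1 ≤ f := fun f hf => pvFreq_pos ints f hf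
  have hnn : ∀ f ∈ freq, 0 ≤ f := fun f hf => le_trans (by norm_num) (hpos f hf)
  have hne : freq ≠ [] := pvFreq_ne_nil ints hpre
  obtain ⟨g0, -, gmem, gmax⟩ := pvFold_props freq 0 le_rfl hnn
  set g := freq.foldl pvGcd 0 with hg
  -- g divides each frequency; each frequency is ≥ 1, so g ≠ 0 and g ≤ each frequency
  rcases List.exists_mem_of_ne_nil freq hne with ⟨f0, hf0⟩
  have hgne : g ≠ 0 := by
    intro h0
    have := gmem f0 hf0
    rw [h0] at this
    have := (zero_dvd_iff).mp this
    have := hpos f0 hf0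
    omega
  have hgpos : 0 < g := lt_of_le_of_ne g0 (Ne.symm hgne)
  cases hmn : PySem.List.min? freq (fun x => x) with
  | none => exact absurd ((PySem.List.min?_eq_none_iff freq _).mp hmn) hne
  | some mn =>
    cases hmx : PySem.List.max? freq (fun x => x) with
    | none => exact absurd ((PySem.List.max?_eq_none_iff freq _).mp hmx) hne
    | some mx =>
      have hmnmem : mn ∈ freq := PySem.List.min?_mem hmn
      have hmxmax : ∀ y ∈ freq, y ≤ mx := fun y hy => PySem.List.max?_isMax hmx y hy
      simp only [hmn, hmx]
      by_cases h1 : mn = 1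
      · -- A returns False; g divides mn = 1 so g = 1 < 2
        have : g ∣ (1 : Int) := h1 ▸ gmem mn hmnmem
        have hg1 : g = 1 := by
          have := Int.le_of_dvd (by norm_num) this
          omega
        simp [h1, hg1]
      · rw [if_neg (by simpa using h1)]
        by_cases h2 : 2 ≤ g
        · -- the loop finds i = g
          have hgle : g ≤ mx := le_trans (Int.le_of_dvd (by have := hpos f0 hf0; omega) (gmem f0 hf0)) (hmxmax f0 hf0)
          have : pvLoopA freq (PySem.List.pyRange 2 (mx + 1) 1) = true := by
            rw [pvLoopA_true_iff]
            refine ⟨g, PySem.List.mem_pyRange_one.mpr ⟨h2, by omega⟩, ?_⟩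
            simp only [List.all_eq_true, beq_iff_eq]
            intro f hf
            exact (PySem.Int.mod_eq_zero_iff_dvd f g).mpr (gmem f hf)
          simp [this, h2]
        · -- no divisor works: any i found would divide g, forcing g ≥ 2
          have : pvLoopA freq (PySem.List.pyRange 2 (mx + 1) 1) = false := by
            rw [Bool.eq_false_iff]
            intro hc
            obtain ⟨i, hir, hall⟩ := (pvLoopA_true_iff freq _).mp hc
            have hi2 : 2 ≤ i := (PySem.List.mem_pyRange_one.mp hir).1
            have hidvd : ∀ f ∈ freq, i ∣ f := by
              intro f hf
              have := (List.all_eq_true.mp hall) f hf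
              exact (PySem.Int.mod_eq_zero_iff_dvd f i).mp (by simpa using this)
            have : i ∣ g := gmax i (dvd_zero i) hidvd
            have := Int.le_of_dvd hgpos this
            omega
          simp [this, h2]
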